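-- pv_equiv track=rewrite | github.com/edkrueger/python-algorithms | resc/math.py | _prep_integer_lists
-- ===== SOURCE A (Python) =====
-- def _log_ceil_rec(n, base):
--     """Returns the number of times base divides n."""
--     return 0 if n < base else 1 + _log_ceil_rec(n // base, base)
--
-- def log_ceil_rec(n, base):
--     """Returns the ceiling of the log with base base of an integer n."""
--     # disabled because lack of walrus suport
--     # pylint: disable=used-before-assignment
--     return log if base ** (log := _log_ceil_rec(n, base)) == n else log + 1
--
-- def _prep_integer_lists(x, y):
--     x = [int(e) for e in list(str(x))]
--     y = [int(e) for e in list(str(y))]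
--
--     len_x = len(x)
--     len_y = len(y)
--     max_len = max(len_x, len_y)
--
--     log_ceil = log_ceil_rec(max_len, 2)
--     len_padded = 2 ** log_ceil
--
--     x_padded = (len_padded - len_x) * [0] + x
--     y_padded = (len_padded - len_y) * [0] + y
--
--     return x_padded, y_padded
-- ===== SOURCE B (Python) =====
-- def _prep_integer_lists(x, y):
--     sx, sy = str(x), str(y)
--     len_padded = 1 << (max(len(sx), len(sy)) - 1).bit_length()
--     return ([int(c) for c in sx.zfill(len_padded)],
--             [int(c) for c in sy.zfill(len_padded)])
-- ===== Notes on version B (the rewrite author's own statement) =====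
-- stated objective: simpler
-- what changed: Replaces the recursive log_ceil helper pair by a closed-form bit_length computation of the padded power-of-2 length, and builds each list by zero-padding the decimal string first and converting to digits afterwards (pad-then-convert instead of convert-then-pad).
import Mathlib
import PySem

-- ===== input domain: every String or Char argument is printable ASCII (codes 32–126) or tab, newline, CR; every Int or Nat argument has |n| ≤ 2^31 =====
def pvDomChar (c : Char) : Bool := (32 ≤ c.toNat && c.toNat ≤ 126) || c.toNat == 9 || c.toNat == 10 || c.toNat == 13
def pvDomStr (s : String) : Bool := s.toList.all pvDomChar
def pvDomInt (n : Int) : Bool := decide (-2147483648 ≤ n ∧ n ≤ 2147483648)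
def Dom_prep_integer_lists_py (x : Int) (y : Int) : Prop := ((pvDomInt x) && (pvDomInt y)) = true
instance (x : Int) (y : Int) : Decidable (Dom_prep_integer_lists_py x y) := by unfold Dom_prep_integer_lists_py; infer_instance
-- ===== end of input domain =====

-- B replaces A's recursive log_ceil helper by a closed-form bit_length computation and
-- pads the decimal string before converting to digits (pad-then-convert vs convert-then-pad); objective: simpler.

-- int(c) for a one-character string c; the `.getD 0` default is unreachable under
-- Pre_ (for nonnegative x, y every character handled is a decimal digit).
def pyIntOfChar (c : Char) : Int := (PySem.Int.ofChars? [c]).getD 0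

-- ===== PORT A =====
-- `_log_ceil_rec(n, base)`: fuel-based transcription of the Python recursion; fuel
-- n.toNat + 1 suffices on every input the entry function produces (base = 2, n ≥ 1).
def logCeilRecAux : Nat → Int → Int → Int
  | 0, _, _ => 0
  | fuel + 1, n, base =>
    if n < base then 0 else 1 + logCeilRecAux fuel (PySem.Int.floordiv n base) base

-- `log_ceil_rec(n, base)` (the exponent is nonnegative, hence `.toNat` for `**`)
def log_ceil_rec (n : Int) (base : Int) : Int :=
  let log := logCeilRecAux (n.toNat + 1) n base
  if base ^ log.toNat = n then log else log + 1

def prep_integer_lists_py (x : Int) (y : Int) : List Int × List Int :=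
  let xd := (PySem.Int.toStr x).toList.map pyIntOfChar
  let yd := (PySem.Int.toStr y).toList.map pyIntOfChar
  let len_x : Int := PySem.List.len xd
  let len_y : Int := PySem.List.len yd
  let max_len : Int := max len_x len_y
  let log_ceil := log_ceil_rec max_len 2
  let len_padded : Int := 2 ^ log_ceil.toNat
  (List.replicate (len_padded - len_x).toNat 0 ++ xd,
   List.replicate (len_padded - len_y).toNat 0 ++ yd)

-- ===== PORT B =====
def prep_integer_lists_py_alt (x : Int) (y : Int) : List Int × List Int :=
  let sx := PySem.Int.toStr x
  let sy := PySem.Int.toStr y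
  let len_padded : Int :=
    1 <<< PySem.Int.bitLength (max (PySem.Str.len sx) (PySem.Str.len sy) - 1)
  ((PySem.Str.zfill sx len_padded).toList.map pyIntOfChar,
   (PySem.Str.zfill sy len_padded).toList.map pyIntOfChar)

-- ===== PRECONDITION & SPEC =====
-- Pre_ excludes negative x or y: there str(x) starts with '-' and int('-') raises
-- ValueError in A (and in B alike), so A returns no value.
def Pre_prep_integer_lists_py (x : Int) (y : Int) : Prop := 0 ≤ x ∧ 0 ≤ y
instance (x : Int) (y : Int) : Decidable (Pre_prep_integer_lists_py x y) := by
  unfold Pre_prep_integer_lists_py; infer_instance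

def pvWitness_prep_integer_lists_py : Int × Int := (7, 12345)

def Spec_prep_integer_lists_py (x : Int) (y : Int) (out : List Int × List Int) : Prop := out = prep_integer_lists_py_alt x y
instance (x : Int) (y : Int) (out : List Int × List Int) : Decidable (Spec_prep_integer_lists_py x y out) := by unfold Spec_prep_integer_lists_py; infer_instance

-- ===== CLAIM (what is proved, stated in full; the proofs are below) =====
def Claim_equal_prep_integer_lists_py : Prop := ∀ (x : Int) (y : Int), Dom_prep_integer_lists_py x y → Pre_prep_integer_lists_py x y → Spec_prep_integer_lists_py x y (prep_integer_lists_py x y)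

-- ===== LEMMAS AND PROOFS =====

-- every character emitted by Nat.toDigitsCore base 10 is a decimal digit
lemma toDigitsCore_digits :
    ∀ (fuel n : Nat) (ds : List Char), (∀ c ∈ ds, c.isDigit = true) →
      ∀ c ∈ Nat.toDigitsCore 10 fuel n ds, c.isDigit = true := by
  intro fuel
  induction fuel with
  | zero => intro n ds hds c hc; exact hds c hc
  | succ f ih =>
    intro n ds hds c hc
    rw [Nat.toDigitsCore] at hc
    have hdig : (Nat.digitChar (n % 10)).isDigit = true := by
      have : n % 10 < 10 := Nat.mod_lt _ (by omega)
      revert this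
      generalize n % 10 = k
      revert k; decide
    by_cases h : n / 10 = 0
    · simp only [h] at hc
      rcases List.mem_cons.mp hc with rfl | hc
      · exact hdig
      · exact hds c hc
    · simp only [if_neg h] at hc
      refine ih (n / 10) _ ?_ c hc
      intro c' hc'
      rcases List.mem_cons.mp hc' with rfl | hc'
      · exact hdig
      · exact hds c' hc'

lemma toDigitsCore_ne_nil :
    ∀ (fuel n : Nat) (ds : List Char), fuel ≠ 0 ∨ ds ≠ [] →
      Nat.toDigitsCore 10 fuel n ds ≠ [] := by
  intro fuel
  induction fuel with
  | zero => intro n ds h; rcases h with h | h; · omega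
            · rw [Nat.toDigitsCore]; exact h
  | succ f ih =>
    intro n ds _
    rw [Nat.toDigitsCore]
    by_cases h : n / 10 = 0
    · simp [h]
    · simp only [if_neg h]
      exact ih (n / 10) _ (Or.inr (by simp))

lemma toDigits_digits (n : Nat) : ∀ c ∈ Nat.toDigits 10 n, c.isDigit = true := by
  intro c hc
  exact toDigitsCore_digits (n + 1) n [] (by simp) c hc

lemma toDigits_ne_nil (n : Nat) : Nat.toDigits 10 n ≠ [] :=
  toDigitsCore_ne_nil (n + 1) n [] (Or.inl (by omega))

-- the aux recursion returns a floor-log-2 bracket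
lemma logCeilRecAux_bracket :
    ∀ (fuel : Nat) (n : Int), n.toNat < fuel → 1 ≤ n →
      ∃ l : Nat, logCeilRecAux fuel n 2 = (l : Int) ∧
        2 ^ l ≤ n.toNat ∧ n.toNat < 2 ^ (l + 1) := by
  intro fuel
  induction fuel with
  | zero => intro n h; omega
  | succ f ih =>
    intro n hf h1
    rw [logCeilRecAux]
    by_cases h2 : n < 2
    · refine ⟨0, by simp [h2], by omega, by omega⟩
    · rw [if_neg h2]
      have hn : n = ((n.toNat : Nat) : Int) := (Int.toNat_of_nonneg (by omega)).symm
      have hfd : PySem.Int.floordiv n 2 = ((n.toNat / 2 : Nat) : Int) := by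
        rw [hn]; exact_mod_cast PySem.Int.floordiv_natCast n.toNat 2
      have hlt : ((n.toNat / 2 : Nat) : Int).toNat < f := by
        simp only [Int.toNat_natCast]; omega
      have h1' : (1 : Int) ≤ ((n.toNat / 2 : Nat) : Int) := by
        have : 2 ≤ n.toNat := by omega
        exact_mod_cast Nat.one_le_div_iff (by omega) |>.mpr this
      obtain ⟨l, hl, hlo, hhi⟩ := ih _ hlt h1'
      refine ⟨l + 1, by rw [hfd, hl]; push_cast; ring, ?_, ?_⟩
      · simp only [Int.toNat_natCast] at hlo
        have := Nat.div_mul_le_self n.toNat 2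
        calc 2 ^ (l + 1) = 2 ^ l * 2 := by ring
        _ ≤ n.toNat / 2 * 2 := by omega
        _ ≤ n.toNat := by omega
      · simp only [Int.toNat_natCast] at hhi
        have : n.toNat / 2 ≤ 2 ^ (l + 1) - 1 := by omega
        have h2' : n.toNat < (n.toNat / 2) * 2 + 2 := by omega
        calc n.toNat < n.toNat / 2 * 2 + 2 := h2'
        _ ≤ (2 ^ (l + 1) - 1) * 2 + 2 := by omega
        _ ≤ 2 ^ (l + 1 + 1) := by rw [pow_succ]; omega

-- len_padded agrees between the two ports and dominates the input length
lemma len_padded_eq (m : Nat) (hm : 1 ≤ m) :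
    (2 : Int) ^ (log_ceil_rec (m : Int) 2).toNat
        = ((1 <<< PySem.Int.bitLength ((m : Int) - 1) : Nat) : Int) ∧
    (m : Int) ≤ (2 : Int) ^ (log_ceil_rec (m : Int) 2).toNat := by
  obtain ⟨l, hl, hlo, hhi⟩ := logCeilRecAux_bracket ((m : Int).toNat + 1) (m : Int)
    (by omega) (by exact_mod_cast hm)
  simp only [Int.toNat_natCast] at hlo hhi
  -- the exponent e that A computes
  have he : ∃ e : Nat, (log_ceil_rec (m : Int) 2).toNat = e ∧
      m ≤ 2 ^ e ∧ (e = 0 ∨ 2 ^ (e - 1) < m) := by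
    unfold log_ceil_rec
    rw [hl]
    by_cases heq : (2 : Int) ^ ((l : Int)).toNat = (m : Int)
    · refine ⟨l, by simp only [Int.toNat_natCast] at heq ⊢; rw [if_pos heq]; simp, ?_, ?_⟩
      · simp only [Int.toNat_natCast] at heq
        have : ((2 ^ l : Nat) : Int) = (m : Int) := by push_cast; exact heq
        omega
      · rcases Nat.eq_zero_or_pos l with h0 | h0
        · exact Or.inl h0
        · right
          simp only [Int.toNat_natCast] at heq
          have hml : ((2 ^ l : Nat) : Int) = (m : Int) := by push_cast; exact heq
          have hml' : 2 ^ l = m := by exact_mod_cast hml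
          have : 2 ^ (l - 1) < 2 ^ l := Nat.pow_lt_pow_right (by omega) (by omega)
          omega
    · rw [if_neg heq]
      refine ⟨l + 1, by simp, by omega, Or.inr ?_⟩
      simp only [Nat.add_sub_cancel]
      simp only [Int.toNat_natCast] at heq
      have : 2 ^ l ≠ m := by
        intro h; apply heq; exact_mod_cast congrArg (Nat.cast : Nat → Int) h
      omega
  obtain ⟨e, hev, hub, hlb⟩ := he
  -- the exponent that B computes
  set b := PySem.Int.bitLength ((m : Int) - 1) with hb
  have hbub : m ≤ 2 ^ b := by
    have := PySem.Int.lt_two_pow_bitLength ((m : Int) - 1)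
    rw [← hb] at this
    have hna : ((m : Int) - 1).natAbs = m - 1 := by omega
    omega
  have hblb : b = 0 ∨ 2 ^ (b - 1) < m := by
    by_cases hm1 : m = 1
    · left; rw [hb, hm1]; simp [PySem.Int.bitLength_zero]
    · right
      have hne : ((m : Int) - 1) ≠ 0 := by omega
      have := PySem.Int.two_pow_bitLength_le ((m : Int) - 1) hne
      rw [← hb] at this
      have hna : ((m : Int) - 1).natAbs = m - 1 := by omega
      omega
  -- uniqueness of the exponent
  have hbe : e = b := by
    have pe : 1 ≤ 2 ^ (e - 1) := Nat.one_le_two_pow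
    have pb : 1 ≤ 2 ^ (b - 1) := Nat.one_le_two_pow
    rcases hlb with h0 | hlbe
    · rw [h0] at hub; norm_num at hub
      rcases hblb with h0' | hblbe
      · omega
      · omega
    · rcases hblb with h0' | hblbe
      · rw [h0'] at hbub; norm_num at hbub
        omega
      · have h1 : 2 ^ (e - 1) < 2 ^ b := lt_of_lt_of_le hlbe hbub
        have h2 : 2 ^ (b - 1) < 2 ^ e := lt_of_lt_of_le hblbe hub
        have h1' := (Nat.pow_lt_pow_iff_right (a := 2) (by omega)).mp h1
        have h2' := (Nat.pow_lt_pow_iff_right (a := 2) (by omega)).mp h2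
        omega
  constructor
  · rw [hev, hbe, Nat.shiftLeft_eq, one_mul]
    push_cast
    ring
  · rw [hev]
    exact_mod_cast hub

-- padding commutes with the digit conversion
lemma pad_comm (c : Char) (rest : List Char) (L : Int)
    (hd : c.isDigit = true) (hle : ((c :: rest).length : Int) ≤ L) :
    List.replicate (L - ((c :: rest).length : Int)).toNat (0 : Int)
        ++ (c :: rest).map pyIntOfChar
      = (PySem.Chars.zfill (c :: rest) L).map pyIntOfChar := by
  unfold PySem.Chars.zfill
  by_cases h : L ≤ ((c :: rest).length : Int)
  · have : L = ((c :: rest).length : Int) := le_antisymm h hle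
    rw [if_pos h, this]
    simp
  · rw [if_neg h]
    have hc : ¬ (c = '+' ∨ c = '-') := by
      rintro (rfl | rfl) <;> simp at hd
    show List.replicate (L - ((c :: rest).length : Int)).toNat (0 : Int)
          ++ (c :: rest).map pyIntOfChar
        = List.map pyIntOfChar
            (if c = '+' ∨ c = '-' then
              c :: (List.replicate (L.toNat - (c :: rest).length) '0' ++ rest)
            else List.replicate (L.toNat - (c :: rest).length) '0' ++ (c :: rest))
    rw [if_neg hc]
    rw [List.map_append, List.map_replicate]
    have h0 : pyIntOfChar '0' = 0 := by decide
    rw [h0]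
    congr 1
    congr 1
    omega

-- ===== VERDICT (by name: the statement is the Claim_ definition above) =====
theorem prep_integer_lists_py_spec : Claim_equal_prep_integer_lists_py := by
  intro x y _ hpre
  obtain ⟨hx, hy⟩ := hpre
  unfold Spec_prep_integer_lists_py prep_integer_lists_py prep_integer_lists_py_alt
  simp only [PySem.Int.toList_toStr, PySem.Str.toList_zfill, PySem.Str.len_eq,
    PySem.List.len_eq, List.length_map]
  have hx' : ¬ x < 0 := by omega
  have hy' : ¬ y < 0 := by omega
  have hcx : PySem.Int.toChars x = Nat.toDigits 10 x.toNat := by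
    unfold PySem.Int.toChars; rw [if_neg hx']
  have hcy : PySem.Int.toChars y = Nat.toDigits 10 y.toNat := by
    unfold PySem.Int.toChars; rw [if_neg hy']
  rw [hcx, hcy]
  obtain ⟨cx, rx, hcx'⟩ : ∃ c r, Nat.toDigits 10 x.toNat = c :: r := by
    cases h : Nat.toDigits 10 x.toNat with
    | nil => exact absurd h (toDigits_ne_nil _)
    | cons c r => exact ⟨c, r, rfl⟩
  obtain ⟨cy, ry, hcy'⟩ : ∃ c r, Nat.toDigits 10 y.toNat = c :: r := by
    cases h : Nat.toDigits 10 y.toNat with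
    | nil => exact absurd h (toDigits_ne_nil _)
    | cons c r => exact ⟨c, r, rfl⟩
  rw [hcx', hcy']
  set nx := (cx :: rx).length with hnx
  set ny := (cy :: ry).length with hny
  have hmax : max ((nx : Int)) ((ny : Int)) = ((max nx ny : Nat) : Int) := by
    exact_mod_cast (Nat.cast_max nx ny).symm
  rw [hmax]
  have hm1 : 1 ≤ max nx ny := by
    have : 1 ≤ nx := by rw [hnx]; simp
    omega
  obtain ⟨hLeq, hLub⟩ := len_padded_eq (max nx ny) hm1
  rw [← hLeq]
  set L : Int := (2 : Int) ^ (log_ceil_rec ((max nx ny : Nat) : Int) 2).toNat with hL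
  have hLx : ((cx :: rx).length : Int) ≤ L := by
    have : (nx : Int) ≤ ((max nx ny : Nat) : Int) := by exact_mod_cast Nat.le_max_left nx ny
    rw [← hnx]; omega
  have hLy : ((cy :: ry).length : Int) ≤ L := by
    have : (ny : Int) ≤ ((max nx ny : Nat) : Int) := by exact_mod_cast Nat.le_max_right nx ny
    rw [← hny]; omega
  have hdx : cx.isDigit = true := toDigits_digits x.toNat cx (by rw [hcx']; simp)
  have hdy : cy.isDigit = true := toDigits_digits y.toNat cy (by rw [hcy']; simp)
  rw [Prod.mk.injEq]
  constructor
  · exact pad_comm cx rx L hdx hLx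
  · exact pad_comm cy ry L hdy hLy
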